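-- pv_equiv track=rewrite | github.com/PatrickSuhm/Advent-of-Code | 2023/d03.py | getNumsFromLine
-- ===== SOURCE A (Python) =====
-- def getNumsFromLine(line):
--     current = ""
--     numbers = []
--     start = None
--     for i, char in enumerate(line):
--         if char.isdigit():
--             if start is None:
--                 start = i
--             current += char
--         elif current:
--             end = i - 1
--             numbers.append({
--                 "value": int(current),
--                 "start": start,
--                 "end": end
--             })
--             current = ""
--             start = None
--     if current:
--         end = len(line) - 1
--         numbers.append({
--             "value": int(current),
--             "start": start,
--             "end": end
--         })
--     return numbers
-- ===== SOURCE B (Python) =====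
-- def getNumsFromLine(line):
--     numbers = []
--     i, n = 0, len(line)
--     while i < n:
--         if line[i].isdigit():
--             j = i + 1
--             while j < n and line[j].isdigit():
--                 j += 1
--             numbers.append({"value": int(line[i:j]), "start": i, "end": j - 1})
--             i = j
--         else:
--             i += 1
--     return numbers
-- ===== Notes on version B (the rewrite author's own statement) =====
-- stated objective: alternative
-- what changed: Replaced the char-by-char accumulator state machine (current/start with a post-loop flush) by an index-jumping run scanner: on a digit it advances an inner cursor to the end of the run and emits the entry directly from the two indices, so no partial-number string or pending-start state is carried across iterations.
import Mathlib
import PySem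

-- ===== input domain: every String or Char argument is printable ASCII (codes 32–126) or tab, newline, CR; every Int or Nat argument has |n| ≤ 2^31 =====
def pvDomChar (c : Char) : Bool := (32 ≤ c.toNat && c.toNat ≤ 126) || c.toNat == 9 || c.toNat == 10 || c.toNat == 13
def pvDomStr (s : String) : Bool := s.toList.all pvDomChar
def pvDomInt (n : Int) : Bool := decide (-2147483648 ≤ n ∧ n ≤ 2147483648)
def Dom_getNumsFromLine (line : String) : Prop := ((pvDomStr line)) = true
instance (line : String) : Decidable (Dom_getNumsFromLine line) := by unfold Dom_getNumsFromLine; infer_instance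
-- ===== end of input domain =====

-- B replaces A's char-by-char current/start accumulator state machine (with its post-loop
-- flush) by an index-jumping run scanner that emits each digit run directly; same cost.

-- ===== PORT A =====
-- the dict literal appended to `numbers`; int(current) is PySem.Int.ofChars?, exact since
-- current is a nonempty run of ASCII digits whenever int() is called (.getD 0 never fires)
def pvEntryA (current : List Char) (start : Option Int) (e : Int) : List (String × Int) :=
  [("value", (PySem.Int.ofChars? current).getD 0), ("start", start.getD 0), ("end", e)]

-- the body of A's for-loop, one step of the fold over enumerate(line)
def pvStepA (st : List Char × List (List (String × Int)) × Option Int)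
    (p : Int × Char) : List Char × List (List (String × Int)) × Option Int :=
  if PySem.Chars.isdigit p.2 then
    (st.1 ++ [p.2], st.2.1, if st.2.2 = none then some p.1 else st.2.2)
  else if st.1 ≠ [] then
    ([], st.2.1 ++ [pvEntryA st.1 st.2.2 (p.1 - 1)], none)
  else st

def getNumsFromLine (line : String) : List (List (String × Int)) :=
  let st := (PySem.List.enumerate line.toList).foldl pvStepA ([], [], none)
  if st.1 ≠ [] then st.2.1 ++ [pvEntryA st.1 st.2.2 (PySem.Str.len line - 1)]
  else st.2.1

-- ===== PORT B =====
-- B's outer while-loop over indices, as structural recursion on the remaining characters: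
-- the inner `while j < n and line[j].isdigit(): j += 1` is takeWhile/dropWhile on the rest,
-- line[i:j] is the run itself, end = j - 1 = i + run.length - 1
def pvRuns (i : Int) (cs : List Char) : List (List (String × Int)) :=
  match cs with
  | [] => []
  | c :: cs' =>
    if PySem.Chars.isdigit c then
      let run := c :: cs'.takeWhile PySem.Chars.isdigit
      [("value", (PySem.Int.ofChars? run).getD 0), ("start", i), ("end", i + (run.length : Int) - 1)]
        :: pvRuns (i + (run.length : Int)) (cs'.dropWhile PySem.Chars.isdigit)
    else pvRuns (i + 1) cs'
termination_by cs.length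
decreasing_by
  · exact Nat.lt_succ_of_le (List.length_dropWhile_le _ _)
  · exact Nat.lt_succ_self _

def getNumsFromLine_alt (line : String) : List (List (String × Int)) :=
  pvRuns 0 line.toList

-- ===== PRECONDITION & SPEC =====
def Spec_getNumsFromLine (line : String) (out : List (List (String × Int))) : Prop := out = getNumsFromLine_alt line
instance (line : String) (out : List (List (String × Int))) : Decidable (Spec_getNumsFromLine line out) := by unfold Spec_getNumsFromLine; infer_instance

-- ===== CLAIM (what is proved, stated in full; the proofs are below) =====
def Claim_equal_getNumsFromLine : Prop := ∀ (line : String), Dom_getNumsFromLine line → Spec_getNumsFromLine line (getNumsFromLine line)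

-- ===== LEMMAS AND PROOFS =====

-- A's post-loop flush as a function of the final state
def pvFinish (last : Int) (st : List Char × List (List (String × Int)) × Option Int) :
    List (List (String × Int)) :=
  if st.1 ≠ [] then st.2.1 ++ [pvEntryA st.1 st.2.2 last] else st.2.1

-- folding A's step over a block of digits only extends `current`
lemma pv_fold_run (ds : List Char) (h : ∀ d ∈ ds, PySem.Chars.isdigit d = true) :
    ∀ (cur : List Char) (ns : List (List (String × Int))) (s i : Int),
    (PySem.List.enumerate ds i).foldl pvStepA (cur, ns, some s) = (cur ++ ds, ns, some s) := by
  induction ds with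
  | nil => intro cur ns s i; simp [PySem.List.enumerate_nil]
  | cons d ds ih =>
    intro cur ns s i
    rw [PySem.List.enumerate_cons]
    simp only [List.foldl_cons]
    have hstep : pvStepA (cur, ns, some s) (i, d) = (cur ++ [d], ns, some s) := by
      simp [pvStepA, h d (by simp)]
    rw [hstep, ih (fun x hx => h x (by simp [hx]))]
    simp

-- the first char of a dropWhile remainder fails the predicate
lemma pv_dropWhile_head (p : Char → Bool) (l : List Char) (r : Char) (rs : List Char)
    (h : l.dropWhile p = r :: rs) : p r = false := by
  have hne : l.dropWhile p ≠ [] := by rw [h]; simp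
  have := List.head_dropWhile_not p hne
  simp only [h, List.head_cons] at this
  simpa using this

-- main invariant: from a clean state, A's fold + flush over the rest equals B's run scan
lemma pv_main : ∀ (n : Nat) (cs : List Char), cs.length ≤ n →
    ∀ (i : Int) (ns : List (List (String × Int))) (N : Int), N = i + cs.length →
    pvFinish (N - 1) ((PySem.List.enumerate cs i).foldl pvStepA ([], ns, none))
      = ns ++ pvRuns i cs := by
  intro n
  induction n with
  | zero =>
    intro cs hle i ns N hN
    have : cs = [] := List.eq_nil_of_length_eq_zero (Nat.le_zero.mp hle)
    subst this
    simp [PySem.List.enumerate_nil, pvFinish, pvRuns]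
  | succ n ih =>
    intro cs hle i ns N hN
    match cs with
    | [] => simp [PySem.List.enumerate_nil, pvFinish, pvRuns]
    | c :: cs' =>
      rw [PySem.List.enumerate_cons]
      simp only [List.foldl_cons]
      by_cases hd : PySem.Chars.isdigit c = true
      · -- digit head: split off the whole run
        have hstep : pvStepA ([], ns, none) (i, c) = ([c], ns, some i) := by
          simp [pvStepA, hd]
        rw [hstep]
        conv_lhs => rw [show cs' = cs'.takeWhile PySem.Chars.isdigit ++ cs'.dropWhile PySem.Chars.isdigit
          from (List.takeWhile_append_dropWhile).symm]
        rw [PySem.List.enumerate_append, List.foldl_append]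
        rw [pv_fold_run _ (fun d hm => List.mem_takeWhile_imp hm) [c] ns i (i + 1)]
        rw [pvRuns]
        simp only [hd, reduceIte]
        have hlen : cs'.length = (cs'.takeWhile PySem.Chars.isdigit).length
            + (cs'.dropWhile PySem.Chars.isdigit).length := by
          conv_lhs => rw [show cs' = cs'.takeWhile PySem.Chars.isdigit ++ cs'.dropWhile PySem.Chars.isdigit
            from (List.takeWhile_append_dropWhile).symm]
          rw [List.length_append]
        match hdwe : cs'.dropWhile PySem.Chars.isdigit with
        | [] =>
          rw [hdwe] at hlen
          simp only [PySem.List.enumerate_nil, List.foldl_nil, pvRuns]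
          have hN1 : N - 1 = i + ((c :: cs'.takeWhile PySem.Chars.isdigit).length : Int) - 1 := by
            rw [hN]; simp [hlen]
          simp [pvFinish, pvEntryA, hN1]
        | r :: rs =>
          have hr : PySem.Chars.isdigit r = false := pv_dropWhile_head _ _ _ _ hdwe
          rw [hdwe] at hlen
          rw [PySem.List.enumerate_cons]
          simp only [List.foldl_cons]
          have hstep2 : pvStepA ([c] ++ cs'.takeWhile PySem.Chars.isdigit, ns, some i)
              (i + 1 + (cs'.takeWhile PySem.Chars.isdigit).length, r)
              = ([], ns ++ [pvEntryA ([c] ++ cs'.takeWhile PySem.Chars.isdigit) (some i)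
                  (i + 1 + (cs'.takeWhile PySem.Chars.isdigit).length - 1)], none) := by
            simp [pvStepA, hr]
          rw [hstep2]
          have hrs : rs.length ≤ n := by simp only [List.length_cons] at hle hlen; omega
          rw [ih rs hrs (i + 1 + (cs'.takeWhile PySem.Chars.isdigit).length + 1) _ N
            (by rw [hN]; simp only [hlen, List.length_cons]; push_cast; ring)]
          rw [List.append_assoc]
          congr 1
          rw [pvRuns]
          simp only [hr, reduceIte, Bool.false_eq_true]
          have h1 : i + 1 + ((cs'.takeWhile PySem.Chars.isdigit).length : Int) + 1
              = i + ((c :: cs'.takeWhile PySem.Chars.isdigit).length : Int) + 1 := by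
            simp only [List.length_cons]; push_cast; ring
          have h2 : i + 1 + ((cs'.takeWhile PySem.Chars.isdigit).length : Int) - 1
              = i + ((c :: cs'.takeWhile PySem.Chars.isdigit).length : Int) - 1 := by
            simp only [List.length_cons]; push_cast; ring
          simp [pvEntryA, h1, h2]
      · -- non-digit head, clean state: nothing happens
        have hstep : pvStepA ([], ns, none) (i, c) = ([], ns, none) := by
          simp [pvStepA, hd]
        rw [hstep]
        rw [ih cs' (by simpa using Nat.le_of_succ_le_succ hle) (i + 1) ns N
          (by rw [hN]; simp only [List.length_cons]; push_cast; ring)]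
        rw [pvRuns]
        simp [hd]

-- ===== VERDICT (by name: the statement is the Claim_ definition above) =====
theorem getNumsFromLine_spec : Claim_equal_getNumsFromLine := by
  intro line _
  show getNumsFromLine line = getNumsFromLine_alt line
  unfold getNumsFromLine getNumsFromLine_alt
  have h := pv_main line.toList.length line.toList le_rfl 0 [] (line.toList.length : Int)
    (by simp)
  simp only [pvFinish] at h
  rw [PySem.Str.len_eq]
  simpa using h
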